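-- pv_equiv track=rewrite | github.com/FreeCAD/FreeCAD | .github/scripts/run_gui_tests.py | parse_registered_tests
-- ===== SOURCE A (Python) =====
-- def parse_registered_tests(output: str) -> list[str]:
--     """Parse output from `FreeCAD -t` and return a list of registered test unit names.
--
--     The function looks for the section starting with the literal 'Registered test units:' and
--     then collects non-empty, stripped lines from that point onwards as test names.
--     """
--     lines = output.splitlines()
--     tests: list[str] = []
--     started = False
--     for ln in lines:
--         if not started:
--             if "Registered test units:" in ln:
--                 started = True
--             continue
--         s = ln.strip()
--         if not s:
--             # allow blank lines but keep going
--             continue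
--         tests.append(s)
--     return tests
-- ===== SOURCE B (Python) =====
-- def parse_registered_tests(output: str) -> list[str]:
--     """Single backward sweep: collect stripped non-empty lines from the end,
--     remember (as a cut index) how many were collected when a marker line is seen;
--     the last marker seen backwards is the first one forwards."""
--     rev = []          # stripped non-empty lines, gathered from the END of the output
--     cut = None        # len(rev) at the earliest marker line seen so far
--     for ln in reversed(output.splitlines()):
--         if "Registered test units:" in ln:
--             cut = len(rev)
--         s = ln.strip()
--         if s:
--             rev.append(s)
--     return rev[:cut][::-1] if cut is not None else []
-- ===== Notes on version B (the rewrite author's own statement) =====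
-- stated objective: alternative
-- what changed: Replaces A's forward boolean-flag state machine by a single backward sweep that accumulates the stripped non-empty lines of each suffix and records a cut index at marker lines (the last marker seen backwards being the first forwards), then slices and reverses once at the end.
import Mathlib
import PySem

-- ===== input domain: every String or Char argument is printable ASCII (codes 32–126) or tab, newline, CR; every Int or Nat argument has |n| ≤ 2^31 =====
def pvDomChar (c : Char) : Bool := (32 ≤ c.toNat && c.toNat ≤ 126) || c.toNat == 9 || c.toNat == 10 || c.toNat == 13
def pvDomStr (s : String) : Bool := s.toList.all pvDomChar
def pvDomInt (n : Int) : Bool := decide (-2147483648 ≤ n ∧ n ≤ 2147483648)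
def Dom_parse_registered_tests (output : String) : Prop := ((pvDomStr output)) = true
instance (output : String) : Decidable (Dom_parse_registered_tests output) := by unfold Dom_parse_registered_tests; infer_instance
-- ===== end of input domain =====

-- B replaces A's forward flag state machine by a backward sweep with a cut index (alternative; same cost); return value only.


-- ===== PORT A =====
-- A's loop: state = (started, tests); branches in A's order.
def pvALoop (lines : List String) (started : Bool) (tests : List String) : List String :=
  match lines with
  | [] => tests
  | ln :: rest =>
    if !started then
      if PySem.Str.isIn "Registered test units:" ln then pvALoop rest true tests
      else pvALoop rest started tests
    else
      let s := PySem.Str.strip ln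
      if s = "" then pvALoop rest started tests
      else pvALoop rest started (tests ++ [s])

def parse_registered_tests (output : String) : List String :=
  pvALoop (PySem.Str.splitlines output) false []

-- ===== PORT B =====
-- B's loop body: state = (rev, cut); cut is taken before the append, as in Source B.
def pvBStep (st : List String × Option Nat) (ln : String) : List String × Option Nat :=
  let cut := if PySem.Str.isIn "Registered test units:" ln then some st.1.length else st.2
  let s := PySem.Str.strip ln
  (if s ≠ "" then st.1 ++ [s] else st.1, cut)

def parse_registered_tests_alt (output : String) : List String :=
  match (PySem.Str.splitlines output).reverse.foldl pvBStep ([], none) with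
  | (_, none) => []
  | (rev, some k) => (PySem.List.slice rev none (some (k : Int))).reverse  -- rev[:cut][::-1]

-- ===== PRECONDITION & SPEC =====
def Spec_parse_registered_tests (output : String) (out : List String) : Prop := out = parse_registered_tests_alt output
instance (output : String) (out : List String) : Decidable (Spec_parse_registered_tests output out) := by unfold Spec_parse_registered_tests; infer_instance

-- ===== CLAIM =====
def Claim_equal_parse_registered_tests : Prop := ∀ (output : String), Dom_parse_registered_tests output → Spec_parse_registered_tests output (parse_registered_tests output)

-- ===== LEMMAS AND PROOFS =====
def pvKeep (l : String) : Option String :=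
  let s := PySem.Str.strip l
  if s = "" then none else some s

def pvP (ln : String) : Bool := PySem.Str.isIn "Registered test units:" ln

theorem pvALoop_started (lines : List String) (acc : List String) :
    pvALoop lines true acc = acc ++ lines.filterMap pvKeep := by
  induction lines generalizing acc with
  | nil => simp [pvALoop]
  | cons ln rest ih =>
    simp only [pvALoop, Bool.not_true, if_neg (by simp : ¬ (false = true)), List.filterMap_cons]
    by_cases h : PySem.Str.strip ln = ""
    · simp [h, pvKeep, ih]
    · simp [h, pvKeep, ih]

theorem pvALoop_scan (lines : List String) :
    pvALoop lines false [] =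
      match lines.findIdx? pvP with
      | none => []
      | some i => (lines.drop (i + 1)).filterMap pvKeep := by
  induction lines with
  | nil => rfl
  | cons ln rest ih =>
    rw [List.findIdx?_cons]
    show (if !false then
        if PySem.Str.isIn "Registered test units:" ln then pvALoop rest true []
        else pvALoop rest false []
      else _) = _
    cases h : pvP ln with
    | true =>
      simp only [pvP] at h
      simp only [h, Bool.not_false, if_true, pvALoop_started, List.nil_append,
        List.drop_succ_cons, List.drop_zero]
    | false =>
      simp only [pvP] at h
      simp only [h, Bool.not_false, if_true, ih]
      cases hf : rest.findIdx? pvP with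
      | none => rfl
      | some i => simp [List.drop_succ_cons]

theorem pvB_foldr (lines : List String) :
    lines.reverse.foldl pvBStep ([], none) =
      ((lines.filterMap pvKeep).reverse,
       (lines.findIdx? pvP).map (fun i => ((lines.drop (i + 1)).filterMap pvKeep).length)) := by
  rw [List.foldl_reverse]
  induction lines with
  | nil => rfl
  | cons ln rest ih =>
    rw [List.foldr_cons, ih, List.findIdx?_cons]
    cases h : pvP ln with
    | true =>
      simp only [pvP] at h
      simp at h
      by_cases hs : PySem.Str.strip ln = "" <;>
        simp [pvBStep, pvKeep, h, hs]
    | false =>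
      simp only [pvP] at h
      simp at h
      cases hf : rest.findIdx? pvP with
      | none =>
        by_cases hs : PySem.Str.strip ln = "" <;>
          simp [pvBStep, pvKeep, h, hs]
      | some i =>
        by_cases hs : PySem.Str.strip ln = "" <;>
          simp [pvBStep, pvKeep, h, hs, List.drop_succ_cons]

theorem pvTake_rev (xs ys : List String) :
    ((xs ++ ys).reverse.take ys.length) = ys.reverse := by
  rw [List.reverse_append]
  exact List.take_left' (by simp)

-- ===== VERDICT =====
theorem parse_registered_tests_spec : Claim_equal_parse_registered_tests := by
  intro output _
  unfold Spec_parse_registered_tests parse_registered_tests parse_registered_tests_alt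
  rw [pvALoop_scan, pvB_foldr]
  cases hf : (PySem.Str.splitlines output).findIdx? pvP with
  | none => simp
  | some i =>
    have hsplit : (PySem.Str.splitlines output).filterMap pvKeep =
        ((PySem.Str.splitlines output).take (i + 1)).filterMap pvKeep ++
          ((PySem.Str.splitlines output).drop (i + 1)).filterMap pvKeep := by
      rw [← List.filterMap_append, List.take_append_drop]
    simp only [Option.map_some, PySem.List.slice_to_natCast]
    rw [hsplit, pvTake_rev]
    simp
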